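-- pv_equiv track=rewrite | github.com/Aasthaengg/IBMdataset | Python_codes/p03592/s959478784.py | is_able
-- ===== SOURCE A (Python) =====
-- from collections import defaultdict
--
-- def is_able(n, m, k):
--     res = defaultdict(bool)
--     res[0] = True
--     for i in range(1, n+1):
--         for j in range(1, m+1):
--             count = 0
--             count += i*j
--             count += (n-i)*(m-j)
--             res[count] = True
--     return res[k]
-- ===== SOURCE B (Python) =====
-- def is_able(n, m, k):
--     # k = i*j + (n-i)*(m-j) = j*(2*i-n) + m*(n-i): for each i solve the linear
--     # equation for j and check that j is an integer in [1, m].  O(n) instead of O(n*m).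
--     if k == 0:
--         return True
--     for i in range(1, n + 1):
--         d = 2 * i - n
--         r = k - m * (n - i)
--         if d == 0:
--             if m >= 1 and k == m * (n - i):
--                 return True
--         elif r % d == 0:
--             j = r // d
--             if 1 <= j <= m:
--                 return True
--     return False
-- ===== Notes on version B (the rewrite author's own statement) =====
-- stated objective: faster
-- what changed: Instead of enumerating all (i,j) pairs, B solves k = j*(2*i-n) + m*(n-i) for j for each i and checks that j is an integer in [1,m], removing the inner loop.
import Mathlib
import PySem

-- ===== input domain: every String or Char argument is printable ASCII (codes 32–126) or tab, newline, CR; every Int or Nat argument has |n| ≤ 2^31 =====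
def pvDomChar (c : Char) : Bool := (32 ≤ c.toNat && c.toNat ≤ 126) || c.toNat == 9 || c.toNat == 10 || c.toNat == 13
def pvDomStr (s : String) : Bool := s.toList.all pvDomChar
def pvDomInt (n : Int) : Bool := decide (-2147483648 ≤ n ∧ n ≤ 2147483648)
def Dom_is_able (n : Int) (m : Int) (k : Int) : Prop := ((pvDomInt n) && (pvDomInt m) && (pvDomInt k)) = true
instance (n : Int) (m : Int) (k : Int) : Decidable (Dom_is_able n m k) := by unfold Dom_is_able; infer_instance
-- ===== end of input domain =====

-- B replaces A's O(n*m) enumeration of all (i,j) by solving the linear equation for j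
-- for each i (objective: faster, inner loop removed).

-- ===== PORT A =====
-- res = defaultdict(bool): its values are only ever True and it is read only at k,
-- so the dict is ported as the list of keys inserted so far (res[c] = True is a cons,
-- the final res[k] is a membership test with default False); exact for this use.
def is_able (n : Int) (m : Int) (k : Int) : Bool :=
  let res : List Int := []
  let res := 0 :: res
  let res := (PySem.List.pyRange 1 (n+1) 1).foldl (fun res i =>
    (PySem.List.pyRange 1 (m+1) 1).foldl (fun res j =>
      let count : Int := 0
      let count := count + i*j
      let count := count + (n-i)*(m-j)
      count :: res) res) res
  res.contains k

-- ===== PORT B =====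
def is_able_alt (n : Int) (m : Int) (k : Int) : Bool :=
  if k = 0 then true
  else (PySem.List.pyRange 1 (n+1) 1).any (fun i =>
    let d := 2*i - n
    let r := k - m*(n-i)
    if d = 0 then decide (1 ≤ m) && decide (k = m*(n-i))
    else if PySem.Int.mod r d = 0 then
      let j := PySem.Int.floordiv r d
      decide (1 ≤ j) && decide (j ≤ m)
    else false)

-- ===== PRECONDITION & SPEC =====
def Spec_is_able (n : Int) (m : Int) (k : Int) (out : Bool) : Prop := out = is_able_alt n m k
instance (n : Int) (m : Int) (k : Int) (out : Bool) : Decidable (Spec_is_able n m k out) := by unfold Spec_is_able; infer_instance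

-- ===== CLAIM (what is proved, stated in full; the proofs are below) =====
def Claim_equal_is_able : Prop := ∀ (n : Int) (m : Int) (k : Int), Dom_is_able n m k → Spec_is_able n m k (is_able n m k)

-- ===== LEMMAS AND PROOFS =====

theorem floordiv_exact (d j : Int) (hd : d ≠ 0) : PySem.Int.floordiv (d*j) d = j := by
  have h1 := PySem.Int.floordiv_mul_add_mod (d*j) d
  have h2 : PySem.Int.mod (d*j) d = 0 := (PySem.Int.mod_eq_zero_iff_dvd _ _).mpr ⟨j, rfl⟩
  rw [h2, add_zero] at h1
  exact mul_right_cancel₀ hd (by linarith [h1])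

-- fold of conses: membership afterwards = "some inserted key equals k" or old membership
theorem contains_foldl_cons (L : List Int) (f : Int → Int) (k : Int) :
    ∀ d : List Int,
      (L.foldl (fun d j => f j :: d) d).contains k
        = (L.any (fun j => k == f j) || d.contains k) := by
  induction L with
  | nil => intro d; simp
  | cons a L ih =>
      intro d
      simp only [List.foldl_cons, List.any_cons, ih, List.contains_cons]
      by_cases h : k = f a
      · simp [h]
      · have hf : (k == f a) = false := beq_eq_false_iff_ne.mpr h
        simp [hf]

theorem contains_foldl2_cons (L : List Int) (M : List Int) (f : Int → Int → Int) (k : Int) :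
    ∀ d : List Int,
      (L.foldl (fun d i => M.foldl (fun d j => f i j :: d) d) d).contains k
        = (L.any (fun i => M.any (fun j => k == f i j)) || d.contains k) := by
  induction L with
  | nil => intro d; simp
  | cons a L ih =>
      intro d
      simp only [List.foldl_cons, List.any_cons, ih, contains_foldl_cons]
      cases M.any (fun j => k == f a j) <;> simp

theorem is_able_eq_any (n m k : Int) :
    is_able n m k
      = ((PySem.List.pyRange 1 (n+1) 1).any (fun i =>
           (PySem.List.pyRange 1 (m+1) 1).any (fun j => k == (0 + i*j + ((n-i)*(m-j)))))
         || (k == 0)) := by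
  show ((PySem.List.pyRange 1 (n+1) 1).foldl
          (fun res i => (PySem.List.pyRange 1 (m+1) 1).foldl
            (fun res j => (0 + i*j + ((n-i)*(m-j))) :: res) res)
          [0]).contains k = _
  rw [contains_foldl2_cons (f := fun i j => 0 + i*j + ((n-i)*(m-j)))]
  simp only [List.contains_cons, List.elem_nil, Bool.or_false]

-- the inner scan over j equals the direct divisibility test, for every i
theorem inner_any_eq (n m k i : Int) :
    ((PySem.List.pyRange 1 (m+1) 1).any (fun j => k == (0 + i*j + ((n-i)*(m-j)))))
      = (if 2*i - n = 0 then decide (1 ≤ m) && decide (k = m*(n-i))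
         else if PySem.Int.mod (k - m*(n-i)) (2*i - n) = 0 then
           decide (1 ≤ PySem.Int.floordiv (k - m*(n-i)) (2*i - n))
             && decide (PySem.Int.floordiv (k - m*(n-i)) (2*i - n) ≤ m)
         else false) := by
  by_cases hd : 2*i - n = 0
  · rw [if_pos hd, Bool.eq_iff_iff]
    simp only [List.any_eq_true, PySem.List.mem_pyRange_one, beq_iff_eq,
      Bool.and_eq_true, decide_eq_true_eq]
    constructor
    · rintro ⟨j, ⟨h1, h2⟩, hk⟩
      have hk' : k = m*(n-i) := by linear_combination hk + j * hd
      exact ⟨by omega, hk'⟩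
    · rintro ⟨h1, hk⟩
      exact ⟨1, ⟨le_refl 1, by omega⟩, by linear_combination hk - hd⟩
  · rw [if_neg hd, Bool.eq_iff_iff]
    simp only [List.any_eq_true, PySem.List.mem_pyRange_one, beq_iff_eq]
    constructor
    · rintro ⟨j, ⟨h1, h2⟩, hk⟩
      have hr : k - m*(n-i) = (2*i-n) * j := by linear_combination hk
      have hdvd : (2*i - n) ∣ (k - m*(n-i)) := ⟨j, hr⟩
      rw [if_pos ((PySem.Int.mod_eq_zero_iff_dvd _ _).mpr hdvd)]
      have hq : PySem.Int.floordiv (k - m*(n-i)) (2*i-n) = j := by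
        rw [hr]; exact floordiv_exact _ _ hd
      have h3 : j ≤ m := by omega
      simp [hq, h1, h3]
    · intro h
      by_cases hm : PySem.Int.mod (k - m*(n-i)) (2*i-n) = 0
      · rw [if_pos hm] at h
        simp only [Bool.and_eq_true, decide_eq_true_eq] at h
        obtain ⟨hge, hle⟩ := h
        obtain ⟨q, hq⟩ := (PySem.Int.mod_eq_zero_iff_dvd _ _).mp hm
        have hjq : PySem.Int.floordiv (k - m*(n-i)) (2*i-n) = q := by
          rw [hq]; exact floordiv_exact _ _ hd
        refine ⟨PySem.Int.floordiv (k - m*(n-i)) (2*i-n), ⟨hge, by omega⟩, ?_⟩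
        have hr2 : k - m*(n-i) = (2*i-n) * PySem.Int.floordiv (k - m*(n-i)) (2*i-n) := by
          rw [hjq]; exact hq
        linear_combination hr2
      · rw [if_neg hm] at h
        simp at h

-- ===== VERDICT (by name: the statement is the Claim_ definition above) =====
theorem is_able_spec : Claim_equal_is_able := by
  intro n m k _
  show is_able n m k = is_able_alt n m k
  rw [is_able_eq_any, is_able_alt]
  by_cases hk : k = 0
  · simp [hk]
  · rw [if_neg hk]
    have hk0 : (k == (0:Int)) = false := beq_eq_false_iff_ne.mpr hk
    rw [hk0, Bool.or_false]
    exact congrArg _ (funext (fun i => inner_any_eq n m k i))
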